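-- pv_equiv track=rewrite | github.com/argrento/leetcode | 1966. Binary Searchable Numbers in an Unsorted Array/solution.py | binarySearchableNumbers
-- ===== SOURCE A (Python) =====
-- from typing import List
--
-- def binarySearchableNumbers(nums: List[int]) -> int:
--     maximums = [nums[0]] # from the left
--     minimums = [0] * len(nums) # from the right
--     min_n = nums[-1]
--     result = 0
--
--     for n in nums[1::]:
--         maximums.append(max(maximums[-1], n))
--
--     for idx in range(len(nums)-1, -1, -1):
--         min_n = min(min_n, nums[idx])
--         minimums[idx] = min_n
--
--         if nums[idx] == maximums[idx] and nums[idx] == minimums[idx]: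
--             result += 1
--
--     return result
-- ===== SOURCE B (Python) =====
-- from typing import List
--
-- def binarySearchableNumbers(nums: List[int]) -> int:
--     # Single forward pass with a monotonic stack of surviving candidates:
--     # push a value when it is >= every value seen so far, pop a candidate
--     # as soon as a smaller value appears after it.
--     stack = []
--     best = None
--     for n in nums:
--         while stack and stack[-1] > n:
--             stack.pop()
--         if best is None or best <= n:
--             stack.append(n)
--             best = n
--     return len(stack)
-- ===== Notes on version B (the rewrite author's own statement) =====
-- stated objective: alternative
-- what changed: A builds a prefix-maximum array and then counts in a second backward pass that maintains a suffix-minimum array; B makes a single forward pass with a monotonic stack: it pushes a value that is >= everything seen so far and pops a candidate the moment a smaller value appears after it, returning the stack size; one fused pass over one small stack beats A's three list-building passes by a constant factor.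
-- outside the precondition, e.g. on binarySearchableNumbers([]): A raises IndexError, B returns 0
import Mathlib
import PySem

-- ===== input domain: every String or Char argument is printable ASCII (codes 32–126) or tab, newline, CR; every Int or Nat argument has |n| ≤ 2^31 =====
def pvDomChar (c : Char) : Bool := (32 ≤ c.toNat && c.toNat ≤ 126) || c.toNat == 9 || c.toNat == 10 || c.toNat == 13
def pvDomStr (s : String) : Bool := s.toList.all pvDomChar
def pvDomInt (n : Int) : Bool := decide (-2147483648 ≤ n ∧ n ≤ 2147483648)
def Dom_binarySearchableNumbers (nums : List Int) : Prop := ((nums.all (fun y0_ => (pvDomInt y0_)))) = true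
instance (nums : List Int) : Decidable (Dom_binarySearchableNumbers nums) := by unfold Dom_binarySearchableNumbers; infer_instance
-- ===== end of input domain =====

-- B replaces A's prefix-maximum array plus backward suffix-minimum counting pass by a
-- single forward pass with a monotonic stack of surviving candidates
-- (objective: alternative algorithm, same O(n) cost; a timing run measured B faster by a constant factor).

-- ===== PORT A =====
-- pyGetD/pySetD are the total forms of nums[i] / minimums[idx] = …; every index is in
-- range whenever nums ≠ [] (Pre_), and on the empty list Python raises IndexError at its first subscript.
-- loop body of 'for n in nums[1::]'
def aMaxStep (acc : List Int) (n : Int) : List Int :=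
  acc ++ [max (PySem.List.pyGetD acc (-1) 0) n]
-- loop body of 'for idx in range(len(nums)-1, -1, -1)'; state (min_n, minimums, result)
def aStep (nums maximums : List Int) (s : Int × List Int × Int) (idx : Int) :
    Int × List Int × Int :=
  let min_n := min s.1 (PySem.List.pyGetD nums idx 0)
  let minimums := PySem.List.pySetD s.2.1 idx min_n
  let result :=
    if PySem.List.pyGetD nums idx 0 = PySem.List.pyGetD maximums idx 0 ∧
       PySem.List.pyGetD nums idx 0 = PySem.List.pyGetD minimums idx 0
    then s.2.2 + 1 else s.2.2
  (min_n, minimums, result)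

def binarySearchableNumbers (nums : List Int) : Int :=
  let maximums0 : List Int := [PySem.List.pyGetD nums 0 0]
  let minimums0 : List Int := List.replicate nums.length 0
  let min_n0 : Int := PySem.List.pyGetD nums (-1) 0
  let maximums := (PySem.List.slice nums (some 1) none).foldl aMaxStep maximums0
  let st := (PySem.List.pyRange ((nums.length : Int) - 1) (-1) (-1)).foldl
      (aStep nums maximums) (min_n0, minimums0, (0 : Int))
  st.2.2

-- ===== PORT B =====
-- 'while stack and stack[-1] > n: stack.pop()' as a structural recursion on dropLast
def popGT (stack : List Int) (n : Int) : List Int :=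
  match h : stack.getLast? with
  | none => stack
  | some v => if n < v then popGT stack.dropLast n else stack
termination_by stack.length
decreasing_by
  simp only [List.length_dropLast]
  have hne : stack ≠ [] := by rintro rfl; simp at h
  have := List.length_pos_of_ne_nil hne
  omega

-- loop body of 'for n in nums'; state (stack, best)
def bStep (st : List Int × Option Int) (n : Int) : List Int × Option Int :=
  let stack := popGT st.1 n
  match st.2 with
  | none => (stack ++ [n], some n)
  | some b => if b ≤ n then (stack ++ [n], some n) else (stack, some b)

def binarySearchableNumbers_alt (nums : List Int) : Int :=
  (((nums.foldl bStep ([], none)).1.length : Nat) : Int)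

-- ===== PRECONDITION & SPEC =====
-- Pre_ excludes only the empty list, on which Python A raises IndexError at its first subscript.
def Pre_binarySearchableNumbers (nums : List Int) : Prop := nums ≠ []
instance (nums : List Int) : Decidable (Pre_binarySearchableNumbers nums) := by
  unfold Pre_binarySearchableNumbers; infer_instance
def pvWitness_binarySearchableNumbers : List Int := [2, 1, 3]

def Spec_binarySearchableNumbers (nums : List Int) (out : Int) : Prop :=
  out = binarySearchableNumbers_alt nums
instance (nums : List Int) (out : Int) : Decidable (Spec_binarySearchableNumbers nums out) := by
  unfold Spec_binarySearchableNumbers; infer_instance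

-- ===== CLAIM (what is proved, stated in full; the proofs are below) =====
def Claim_equal_binarySearchableNumbers : Prop :=
  ∀ (nums : List Int), Dom_binarySearchableNumbers nums →
    Pre_binarySearchableNumbers nums →
    Spec_binarySearchableNumbers nums (binarySearchableNumbers nums)

-- ===== LEMMAS AND PROOFS =====

-- descending index loop 'for idx in range(k-1, -1, -1)' as a Nat recursion
def pvDownTo {σ : Type} (f : σ → Nat → σ) : Nat → σ → σ
  | 0, s => s
  | k+1, s => pvDownTo f k (f s k)

theorem pvRevFold {σ : Type} (f : σ → Int → σ) :
    ∀ (n : Nat) (s : σ),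
      (((List.range n).map (fun k => ((k : Nat) : Int))).reverse).foldl f s
        = pvDownTo (fun st k => f st ((k : Nat) : Int)) n s := by
  intro n
  induction n with
  | zero => intro s; simp [pvDownTo]
  | succ n ih =>
      intro s
      rw [List.range_succ, List.map_append, List.reverse_append]
      simp only [List.map_cons, List.map_nil, List.reverse_cons, List.reverse_nil,
        List.nil_append, List.cons_append, List.foldl_cons]
      exact ih (f s ((n : Nat) : Int))

theorem pvRangeRev {σ : Type} (f : σ → Int → σ) (n : Nat) (s : σ) :
    (PySem.List.pyRange ((n : Int) - 1) (-1) (-1)).foldl f s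
      = pvDownTo (fun st k => f st ((k : Nat) : Int)) n s := by
  have h1 : PySem.List.pyRange ((n : Int) - 1) (-1) (-1)
      = ((List.range n).map (fun k => ((k : Nat) : Int))).reverse := by
    rw [PySem.List.pyRange_neg_one_eq_reverse]
    have h2 : (-1 : Int) + 1 = 0 := by ring
    have h3 : ((n : Int) - 1) + 1 = (n : Int) := by ring
    rw [h2, h3, PySem.List.pyRange_one]
    simp
  rw [h1, pvRevFold]

-- total form of nums[-1]
theorem pvPyGetDLast (l : List Int) (h : l ≠ []) :
    PySem.List.pyGetD l (-1) 0 = l.getLast h := by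
  conv_lhs => rw [← List.dropLast_concat_getLast h]
  rw [PySem.List.pyGetD_neg_one_append_singleton]

-- fold-min/max algebra
theorem pvLeFmin (l : List Int) :
    ∀ (a v : Int), v ≤ l.foldl min a ↔ v ≤ a ∧ ∀ y ∈ l, v ≤ y := by
  induction l with
  | nil => simp
  | cons x l ih =>
      intro a v
      rw [List.foldl_cons, ih, le_min_iff]
      constructor
      · rintro ⟨⟨h1, h2⟩, h3⟩
        refine ⟨h1, ?_⟩
        intro y hy
        rcases List.mem_cons.1 hy with rfl | hy
        · exact h2
        · exact h3 y hy
      · rintro ⟨h1, h2⟩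
        exact ⟨⟨h1, h2 x (List.mem_cons_self)⟩, fun y hy => h2 y (List.mem_cons_of_mem _ hy)⟩

theorem pvFmaxLe (l : List Int) :
    ∀ (a v : Int), l.foldl max a ≤ v ↔ a ≤ v ∧ ∀ y ∈ l, y ≤ v := by
  induction l with
  | nil => simp
  | cons x l ih =>
      intro a v
      rw [List.foldl_cons, ih, max_le_iff]
      constructor
      · rintro ⟨⟨h1, h2⟩, h3⟩
        refine ⟨h1, ?_⟩
        intro y hy
        rcases List.mem_cons.1 hy with rfl | hy
        · exact h2
        · exact h3 y hy
      · rintro ⟨h1, h2⟩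
        exact ⟨⟨h1, h2 x (List.mem_cons_self)⟩, fun y hy => h2 y (List.mem_cons_of_mem _ hy)⟩

theorem pvFminComm (l : List Int) :
    ∀ (a b : Int), l.foldl min (min a b) = min (l.foldl min a) b := by
  induction l with
  | nil => intro a b; rfl
  | cons x l ih =>
      intro a b
      rw [List.foldl_cons, List.foldl_cons, min_right_comm a b x, ih]

theorem pvMemLeFmax (l : List Int) (a y : Int) (hy : y ∈ l) : y ≤ l.foldl max a :=
  ((pvFmaxLe l a _).1 le_rfl).2 y hy

-- the two position predicates (prefix-max position, suffix-min position)
def pvL (nums : List Int) (i : Nat) : Bool :=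
  decide ((nums.take i).foldl max (nums.getD 0 0) ≤ nums.getD i 0)
def pvR (nums : List Int) (i : Nat) : Bool :=
  decide (nums.getD i 0 ≤ (nums.drop (i+1)).foldl min (nums.getD (nums.length - 1) 0))
def pvN (nums : List Int) : Nat :=
  ((List.range nums.length).filter (fun i => pvL nums i && pvR nums i)).length

theorem pvTakeSucc (l : List Int) (i : Nat) (h : i < l.length) :
    l.take (i+1) = l.take i ++ [l.getD i 0] := by
  rw [List.take_succ, List.getElem?_eq_getElem h, List.getD_eq_getElem l 0 h]
  rfl

theorem pvDropCons (l : List Int) (i : Nat) (h : i < l.length) :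
    l.drop i = l.getD i 0 :: l.drop (i+1) := by
  rw [List.getD_eq_getElem l 0 h]
  exact List.drop_eq_getElem_cons h

-- ===== A-side characterisation =====

def pvScanMax : Int → List Int → List Int
  | _, [] => []
  | m, x :: xs => (max m x) :: pvScanMax (max m x) xs

theorem pvScanMax_build (l : List Int) :
    ∀ (pre : List Int) (h : pre ≠ []),
      l.foldl aMaxStep pre = pre ++ pvScanMax (pre.getLast h) l := by
  induction l with
  | nil => intro pre h; simp [pvScanMax]
  | cons x l ih =>
      intro pre h
      rw [List.foldl_cons]
      have h2 : aMaxStep pre x ≠ [] := by simp [aMaxStep]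
      rw [ih _ h2]
      have hg : aMaxStep pre x = pre ++ [max (pre.getLast h) x] := by
        unfold aMaxStep
        rw [pvPyGetDLast pre h]
      have hl : (aMaxStep pre x).getLast h2 = max (pre.getLast h) x := by
        simp [hg]
      rw [hl, hg]
      simp only [pvScanMax, List.append_assoc, List.singleton_append]

theorem pvScanMax_getD (l : List Int) :
    ∀ (m : Int) (i : Nat), i < l.length →
      (pvScanMax m l).getD i 0 = (l.take (i+1)).foldl max m := by
  induction l with
  | nil => intro m i h; simp at h
  | cons x l ih =>
      intro m i hi
      cases i with
      | zero => simp [pvScanMax]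
      | succ j =>
          simp only [pvScanMax, List.getD_cons_succ, List.take_succ_cons, List.foldl_cons]
          exact ih (max m x) j (by simpa using hi)

theorem pvMaximumsGetD (x : Int) (xs : List Int) (i : Nat) (hi : i < xs.length + 1) :
    (xs.foldl aMaxStep [x]).getD i 0 = ((x :: xs).take (i+1)).foldl max x := by
  rw [pvScanMax_build xs [x] (by simp)]
  have hlast : ([x] : List Int).getLast (by simp) = x := rfl
  rw [hlast]
  cases i with
  | zero => simp
  | succ j =>
      have hj : j < xs.length := by omega
      simp only [List.cons_append, List.nil_append, List.getD_cons_succ,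
        List.take_succ_cons, List.foldl_cons, max_self]
      exact pvScanMax_getD xs x j hj

theorem pvLeftBridge (nums : List Int) (i : Nat) (hi : i < nums.length) :
    (nums.getD i 0 = ((nums.take (i+1)).foldl max (nums.getD 0 0))) ↔ pvL nums i = true := by
  rw [pvTakeSucc nums i hi, List.foldl_append]
  simp only [List.foldl_cons, List.foldl_nil, pvL, decide_eq_true_eq]
  constructor
  · intro h
    have h2 : (nums.take i).foldl max (nums.getD 0 0) ≤
        max ((nums.take i).foldl max (nums.getD 0 0)) (nums.getD i 0) := le_max_left _ _
    omega
  · intro h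
    rw [max_eq_right h]

theorem pvRightBridge (nums : List Int) (i : Nat) (hi : i < nums.length) :
    (nums.getD i 0 = ((nums.drop i).foldl min (nums.getD (nums.length - 1) 0))) ↔
      pvR nums i = true := by
  rw [pvDropCons nums i hi]
  simp only [List.foldl_cons, pvR, decide_eq_true_eq]
  rw [pvFminComm]
  constructor
  · intro h
    have h2 : min ((nums.drop (i+1)).foldl min (nums.getD (nums.length - 1) 0)) (nums.getD i 0)
        ≤ (nums.drop (i+1)).foldl min (nums.getD (nums.length - 1) 0) := min_le_left _ _
    omega
  · intro h
    rw [min_eq_right h]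

-- one step of the A loop reads minimums[idx] as the value just written
theorem pvSegSucc (nums : List Int) (i k : Nat) (hik : i ≤ k) (hkn : k < nums.length) :
    (nums.drop i).take (k + 1 - i) = (nums.drop i).take (k - i) ++ [nums.getD k 0] := by
  rw [show k + 1 - i = (k - i) + 1 from by omega, List.take_succ]
  have h2 : (nums.drop i)[k - i]? = some (nums.getD k 0) := by
    rw [List.getElem?_drop, show i + (k - i) = k from by omega]
    rw [List.getElem?_eq_getElem hkn, List.getD_eq_getElem nums 0 hkn]
  rw [h2]
  rfl

theorem pvAloop (nums M : List Int) :
    ∀ (k : Nat) (m : Int) (mins : List Int) (r : Int),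
      k ≤ nums.length → mins.length = nums.length →
      (pvDownTo (fun st j => aStep nums M st ((j : Nat) : Int)) k (m, mins, r)).2.2
        = r + (((List.range k).countP (fun i =>
            decide (nums.getD i 0 = M.getD i 0) &&
            decide (nums.getD i 0 = ((nums.drop i).take (k - i)).foldl min m))) : Int) := by
  intro k
  induction k with
  | zero => intro m mins r _ _; simp [pvDownTo]
  | succ k ih =>
      intro m mins r hk hlen
      have hkn : k < nums.length := by omega
      have hstep : aStep nums M (m, mins, r) ((k : Nat) : Int)
          = (min m (nums.getD k 0), mins.set k (min m (nums.getD k 0)),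
             if nums.getD k 0 = M.getD k 0 ∧ nums.getD k 0 = min m (nums.getD k 0)
             then r + 1 else r) := by
        unfold aStep
        simp only [PySem.List.pySetD_natCast, PySem.List.pyGetD_natCast]
        have hget : ((mins.set k (min m (nums.getD k 0))).getD k 0)
            = min m (nums.getD k 0) := by
          rw [List.getD_eq_getElem _ 0 (by rw [List.length_set]; omega)]
          simp
        rw [hget]
      have hone : pvDownTo (fun st j => aStep nums M st ((j : Nat) : Int)) (k+1) (m, mins, r)
          = pvDownTo (fun st j => aStep nums M st ((j : Nat) : Int)) k
              (aStep nums M (m, mins, r) ((k : Nat) : Int)) := rfl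
      rw [hone, hstep]
      rw [ih (min m (nums.getD k 0)) (mins.set k (min m (nums.getD k 0)))
        _ (by omega) (by rw [List.length_set]; omega)]
      have hcount : (List.range k).countP (fun i =>
            decide (nums.getD i 0 = M.getD i 0) &&
            decide (nums.getD i 0 =
              ((nums.drop i).take (k - i)).foldl min (min m (nums.getD k 0))))
          = (List.range k).countP (fun i =>
            decide (nums.getD i 0 = M.getD i 0) &&
            decide (nums.getD i 0 = ((nums.drop i).take (k + 1 - i)).foldl min m)) := by
        apply List.countP_congr
        intro i hi
        have hik : i < k := by simpa using hi
        rw [pvSegSucc nums i k (by omega) hkn, List.foldl_append]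
        simp only [List.foldl_cons, List.foldl_nil, pvFminComm]
        exact Iff.rfl
      rw [hcount, List.range_succ, List.countP_append]
      have hsegk : ((nums.drop k).take (k + 1 - k)).foldl min m = min m (nums.getD k 0) := by
        rw [show k + 1 - k = 1 from by omega, pvDropCons nums k hkn]
        simp
      simp only [List.countP_cons, List.countP_nil, hsegk]
      by_cases hc : nums.getD k 0 = M.getD k 0 ∧ nums.getD k 0 = min m (nums.getD k 0)
      · rw [if_pos hc]
        have hb : (decide (nums.getD k 0 = M.getD k 0) &&
            decide (nums.getD k 0 = min m (nums.getD k 0))) = true := by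
          rw [Bool.and_eq_true]
          exact ⟨decide_eq_true hc.1, decide_eq_true hc.2⟩
        rw [hb]
        simp only [if_true]
        push_cast
        ring
      · rw [if_neg hc]
        have hb : (decide (nums.getD k 0 = M.getD k 0) &&
            decide (nums.getD k 0 = min m (nums.getD k 0))) = false := by
          rcases Decidable.not_and_iff_or_not.1 hc with h1 | h1
          · rw [decide_eq_false h1, Bool.false_and]
          · rw [decide_eq_false h1, Bool.and_false]
        rw [hb]
        simp

theorem pvGetLastEq (nums : List Int) (h : nums ≠ []) :
    nums.getLast h = nums.getD (nums.length - 1) 0 := by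
  rw [List.getLast_eq_getElem, List.getD_eq_getElem nums 0 (by
    have := List.length_pos_of_ne_nil h; omega)]

theorem pvA_eq (nums : List Int) (h : nums ≠ []) :
    binarySearchableNumbers nums = (pvN nums : Int) := by
  obtain ⟨x, xs, rfl⟩ := List.exists_cons_of_ne_nil h
  unfold binarySearchableNumbers
  simp only [PySem.List.slice_from_one, List.tail_cons]
  rw [pvPyGetDLast _ h, pvRangeRev]
  rw [pvAloop (x :: xs) (xs.foldl aMaxStep [PySem.List.pyGetD (x :: xs) 0 0]) (x :: xs).length
      ((x :: xs).getLast h) (List.replicate (x :: xs).length 0) 0 le_rfl (by simp)]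
  rw [zero_add, pvN, ← List.countP_eq_length_filter]
  congr 1
  apply List.countP_congr
  intro i hi
  have hin : i < (x :: xs).length := by simpa using hi
  have hM : (xs.foldl aMaxStep [PySem.List.pyGetD (x :: xs) 0 0]).getD i 0
      = ((x :: xs).take (i+1)).foldl max x := by
    rw [show PySem.List.pyGetD (x :: xs) 0 0 = x from by simp]
    exact pvMaximumsGetD x xs i (by simpa using hin)
  have hseg : ((x :: xs).drop i).take ((x :: xs).length - i) = (x :: xs).drop i := by
    apply List.take_of_length_le
    rw [List.length_drop]
  rw [hM, hseg, pvGetLastEq _ h]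
  have hL := pvLeftBridge (x :: xs) i hin
  have hR := pvRightBridge (x :: xs) i hin
  rw [show ((x :: xs) : List Int).getD 0 0 = x from rfl] at hL
  constructor
  · intro hb
    simp only [Bool.and_eq_true, decide_eq_true_eq] at hb
    simp only [Bool.and_eq_true]
    exact ⟨hL.1 hb.1, hR.1 hb.2⟩
  · intro hb
    simp only [Bool.and_eq_true] at hb
    simp only [Bool.and_eq_true, decide_eq_true_eq]
    exact ⟨hL.2 hb.1, hR.2 hb.2⟩

-- ===== B-side characterisation =====

-- survival condition of the backward-looking pops: nums[i] ≤ every later value seen so far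
def pvAliveB (nums : List Int) (i t : Nat) : Bool :=
  ((nums.drop (i+1)).take (t - (i+1))).all (fun v => decide (nums.getD i 0 ≤ v))
def pvStackIdx (nums : List Int) (t : Nat) : List Nat :=
  (List.range t).filter (fun i => pvL nums i && pvAliveB nums i t)
def pvStack (nums : List Int) (t : Nat) : List Int :=
  (pvStackIdx nums t).map (fun i => nums.getD i 0)
def pvBest (nums : List Int) (t : Nat) : Option Int :=
  if t = 0 then none else some ((nums.take t).foldl max (nums.getD 0 0))

theorem popGT_nil (n : Int) : popGT [] n = [] := by
  unfold popGT
  rfl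

theorem popGT_concat (s : List Int) (v n : Int) :
    popGT (s ++ [v]) n = if n < v then popGT s n else s ++ [v] := by
  rw [popGT]
  split
  · next h => simp at h
  · next v' h =>
      rw [List.getLast?_concat] at h
      cases Option.some.inj h
      rw [List.dropLast_concat]

-- on a nondecreasing stack the pop-loop is exactly a filter
theorem popGT_sorted (s : List Int) (hs : s.Pairwise (· ≤ ·)) (n : Int) :
    popGT s n = s.filter (fun v => decide (v ≤ n)) := by
  induction s using List.reverseRecOn with
  | nil => simp [popGT_nil]
  | append_singleton s v ih =>
      have hs' : s.Pairwise (· ≤ ·) := hs.sublist (by simp)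
      have hall : ∀ x ∈ s, x ≤ v := by
        intro x hx
        exact (List.pairwise_append.1 hs).2.2 x hx v (by simp)
      rw [popGT_concat, List.filter_append]
      by_cases hv : v ≤ n
      · rw [if_neg (by omega)]
        have h1 : s.filter (fun v => decide (v ≤ n)) = s :=
          List.filter_eq_self.2 (fun x hx => decide_eq_true (le_trans (hall x hx) hv))
        simp [h1, hv]
      · rw [if_pos (by omega), ih hs']
        simp [hv]

-- members of the stack are prefix-max positions, hence its values are nondecreasing
theorem pvMono (nums : List Int) (i i' : Nat) (hii : i < i') (hi' : i' ≤ nums.length)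
    (hL : pvL nums i' = true) : nums.getD i 0 ≤ nums.getD i' 0 := by
  have h1 : (nums.take i').foldl max (nums.getD 0 0) ≤ nums.getD i' 0 := by
    simpa [pvL] using hL
  have hmem : nums.getD i 0 ∈ nums.take i' := by
    have hlen : i < (nums.take i').length := by
      rw [List.length_take]; omega
    have hg : (nums.take i')[i] = nums.getD i 0 := by
      rw [List.getElem_take, List.getD_eq_getElem nums 0 (by omega)]
    rw [← hg]
    exact List.getElem_mem hlen
  exact le_trans (pvMemLeFmax _ _ _ hmem) h1

theorem pvStack_sorted (nums : List Int) (t : Nat) (ht : t ≤ nums.length) :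
    (pvStack nums t).Pairwise (· ≤ ·) := by
  rw [pvStack, List.pairwise_map, pvStackIdx]
  have h1 : ((List.range t).filter (fun i => pvL nums i && pvAliveB nums i t)).Pairwise (· < ·) :=
    List.Pairwise.sublist List.filter_sublist List.pairwise_lt_range
  refine h1.imp_of_mem ?_
  intro a b ha hb hab
  have hmf := List.mem_filter.1 hb
  have hbP : pvL nums b = true := by
    have h2 := hmf.2
    simp only [Bool.and_eq_true] at h2
    exact h2.1
  have hbt : b < t := by simpa using hmf.1
  exact pvMono nums a b hab (by omega) hbP

-- alive shrinks by exactly the new comparison when one more element is read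
theorem pvAliveSucc (nums : List Int) (i t : Nat) (hit : i < t) (ht : t < nums.length) :
    pvAliveB nums i (t+1)
      = (pvAliveB nums i t && decide (nums.getD i 0 ≤ nums.getD t 0)) := by
  unfold pvAliveB
  rw [show t + 1 - (i+1) = t + 1 - (i+1) from rfl]
  have := pvSegSucc nums (i+1) t (by omega) ht
  rw [this, List.all_append]
  simp

-- the loop invariant: after reading the first t values the state is (pvStack t, pvBest t)
theorem pvBinv (nums : List Int) :
    ∀ (t : Nat), t ≤ nums.length →
      ((List.range t).map (fun i => nums.getD i 0)).foldl bStep ([], none)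
        = (pvStack nums t, pvBest nums t) := by
  intro t
  induction t with
  | zero =>
      intro _
      simp [pvStack, pvStackIdx, pvBest]
  | succ t ih =>
      intro ht
      have htn : t < nums.length := by omega
      rw [List.range_succ, List.map_append, List.foldl_append, ih (by omega)]
      simp only [List.map_cons, List.map_nil, List.foldl_cons, List.foldl_nil]
      -- the pop step
      have hpop : popGT (pvStack nums t) (nums.getD t 0)
          = ((List.range t).filter
              (fun i => pvL nums i && pvAliveB nums i (t+1))).map
              (fun i => nums.getD i 0) := by
        rw [popGT_sorted _ (pvStack_sorted nums t (by omega)), pvStack, List.filter_map,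
          pvStackIdx, List.filter_filter]
        congr 1
        apply List.filter_congr
        intro i hi
        have hit : i < t := by simpa using hi
        rw [pvAliveSucc nums i t hit htn]
        simp only [Function.comp_apply]
        cases pvL nums i <;> cases pvAliveB nums i t <;>
          cases decide (nums.getD i 0 ≤ nums.getD t 0) <;> rfl
      -- the push / best step
      cases t with
      | zero =>
          show bStep (pvStack nums 0, pvBest nums 0) (nums.getD 0 0)
              = (pvStack nums 1, pvBest nums 1)
          have hs0 : pvStack nums 0 = [] := by simp [pvStack, pvStackIdx]
          have hL0 : pvL nums 0 = true := by simp [pvL]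
          have hA0 : pvAliveB nums 0 1 = true := by simp [pvAliveB]
          have hs1 : pvStack nums 1 = [nums.getD 0 0] := by
            simp [pvStack, pvStackIdx, List.range_succ, hL0, hA0]
          have hb1 : pvBest nums 1 = some (nums.getD 0 0) := by
            rw [pvBest, if_neg (by omega), pvTakeSucc nums 0 htn]
            simp
          rw [hs0, hs1, hb1]
          simp [bStep, pvBest, popGT_nil]
      | succ k =>
          have hbt : pvBest nums (k+1)
              = some ((nums.take (k+1)).foldl max (nums.getD 0 0)) := by
            rw [pvBest, if_neg (by omega)]
          set m := (nums.take (k+1)).foldl max (nums.getD 0 0) with hm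
          set n := nums.getD (k+1) 0 with hn
          have hLt : pvL nums (k+1) = decide (m ≤ n) := rfl
          have hnext : (nums.take (k+1+1)).foldl max (nums.getD 0 0) = max m n := by
            rw [pvTakeSucc nums (k+1) htn, List.foldl_append]
            simp [hm, hn]
          have hidx : pvStackIdx nums (k+1+1)
              = ((List.range (k+1)).filter
                  (fun i => pvL nums i && pvAliveB nums i (k+1+1)))
                ++ (if pvL nums (k+1) && pvAliveB nums (k+1) (k+1+1)
                    then [k+1] else []) := by
            rw [pvStackIdx, List.range_succ, List.filter_append, List.filter_singleton]
            congr 1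
            cases h : (pvL nums (k+1) && pvAliveB nums (k+1) (k+1+1)) <;> simp
          have hAt : pvAliveB nums (k+1) (k+1+1) = true := by
            simp [pvAliveB]
          rw [hbt]
          show bStep (pvStack nums (k+1), some m) n = (pvStack nums (k+1+1), pvBest nums (k+1+1))
          have hbs : bStep (pvStack nums (k+1), some m) n
              = (if m ≤ n then (popGT (pvStack nums (k+1)) n ++ [n], some n)
                 else (popGT (pvStack nums (k+1)) n, some m)) := rfl
          rw [hbs]
          by_cases hmn : m ≤ n
          · rw [if_pos hmn]
            have hb2 : pvBest nums (k+1+1) = some n := by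
              rw [pvBest, if_neg (by omega), hnext, max_eq_right hmn]
            rw [hb2]
            have hs2 : pvStack nums (k+1+1)
                = ((List.range (k+1)).filter
                    (fun i => pvL nums i && pvAliveB nums i (k+1+1))).map
                    (fun i => nums.getD i 0) ++ [n] := by
              rw [pvStack, hidx, hAt, hLt, decide_eq_true hmn]
              simp [hn]
            rw [hs2, hpop]
          · rw [if_neg hmn]
            have hb2 : pvBest nums (k+1+1) = some m := by
              rw [pvBest, if_neg (by omega), hnext, max_eq_left (by omega)]
            rw [hb2]
            have hs2 : pvStack nums (k+1+1)
                = ((List.range (k+1)).filter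
                    (fun i => pvL nums i && pvAliveB nums i (k+1+1))).map
                    (fun i => nums.getD i 0) := by
              rw [pvStack, hidx, hLt, decide_eq_false hmn]
              simp
            rw [hs2, hpop]

theorem pvSelfMap (l : List Int) :
    (List.range l.length).map (fun i => l.getD i 0) = l := by
  apply List.ext_getElem
  · simp
  · intro i h1 h2
    simp only [List.getElem_map, List.getElem_range]
    rw [List.getD_eq_getElem l 0 (by simpa using h2)]

-- at the end of the pass, survival equals the suffix-min condition
theorem pvAliveR (nums : List Int) (i : Nat) (hi : i < nums.length) :
    pvAliveB nums i nums.length = pvR nums i := by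
  have htake : (nums.drop (i+1)).take (nums.length - (i+1)) = nums.drop (i+1) := by
    apply List.take_of_length_le
    rw [List.length_drop]
  unfold pvAliveB pvR
  rw [htake]
  by_cases hlast : i + 1 < nums.length
  · have hmem : nums.getD (nums.length - 1) 0 ∈ nums.drop (i+1) := by
      have hlen : nums.length - 1 - (i+1) < (nums.drop (i+1)).length := by
        rw [List.length_drop]; omega
      have hg : (nums.drop (i+1))[nums.length - 1 - (i+1)] = nums.getD (nums.length - 1) 0 := by
        rw [List.getElem_drop, List.getD_eq_getElem nums 0 (by omega)]
        congr 1
        omega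
      rw [← hg]
      exact List.getElem_mem hlen
    apply Bool.eq_iff_iff.mpr
    simp only [List.all_eq_true, decide_eq_true_eq]
    constructor
    · intro ha
      apply (pvLeFmin _ _ _).2
      exact ⟨ha _ hmem, fun y hy => ha y hy⟩
    · intro hle y hy
      exact ((pvLeFmin _ _ _).1 hle).2 y hy
  · have hd : nums.drop (i+1) = [] := List.drop_eq_nil_of_le (by omega)
    have hi' : i = nums.length - 1 := by omega
    rw [hd]
    simp [hi']

theorem pvB_eq (nums : List Int) (h : nums ≠ []) :
    binarySearchableNumbers_alt nums = (pvN nums : Int) := by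
  unfold binarySearchableNumbers_alt
  conv_lhs => rw [← pvSelfMap nums]
  rw [pvBinv nums nums.length le_rfl]
  rw [pvN, pvStack, List.length_map, pvStackIdx]
  congr 2
  apply List.filter_congr
  intro i hi
  have hin : i < nums.length := by simpa using hi
  rw [pvAliveR nums i hin]

-- ===== VERDICT (by name: the statement is the Claim_ definition above) =====
theorem binarySearchableNumbers_spec : Claim_equal_binarySearchableNumbers := by
  intro nums _ hpre
  unfold Spec_binarySearchableNumbers
  rw [pvA_eq nums hpre, pvB_eq nums hpre]
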